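-- pv_equiv track=rewrite | github.com/Chai-B/CodeMaster | pipeline/patch_minimizer.py | strip_markdown
-- ===== SOURCE A (Python) =====
-- from typing import List
--
-- def strip_markdown(diff: str) -> str:
--     """Strip markdown codeblock wrappers (``` or ~~~) and preamble text."""
--     lines = diff.splitlines()
--     out: List[str] = []
--     active = False
--     for ln in lines:
--         if ln.startswith("---") or ln.startswith("+++") or ln.startswith("@@"):
--             active = True
--         # Skip fence lines (``` or ~~~)
--         if ln.startswith("```") or ln.startswith("~~~"):
--             if active:
--                 break
--             continue
--         if active:
--             out.append(ln)
--     return "\n".join(out) if out else diff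
-- ===== SOURCE B (Python) =====
-- def _is_header(ln: str) -> bool:
--     return ln.startswith("---") or ln.startswith("+++") or ln.startswith("@@")
--
-- def _is_fence(ln: str) -> bool:
--     return ln.startswith("```") or ln.startswith("~~~")
--
-- def strip_markdown(diff: str) -> str:
--     """Strip markdown codeblock wrappers (``` or ~~~) and preamble text."""
--     lines = diff.splitlines()
--     i = next((k for k, l in enumerate(lines) if _is_header(l)), len(lines))
--     rest = lines[i:]
--     j = next((k for k, l in enumerate(rest) if _is_fence(l)), len(rest))
--     out = rest[:j]
--     return "\n".join(out) if out else diff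
-- ===== Notes on version B (the rewrite author's own statement) =====
-- stated objective: idiomatic
-- what changed: Replaces the single stateful flag-and-break loop with two declarative phases: find the first diff-header line and slice the preamble off, then keep lines up to the first fence; the empty-result fallback to the original text is preserved.
import Mathlib
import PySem

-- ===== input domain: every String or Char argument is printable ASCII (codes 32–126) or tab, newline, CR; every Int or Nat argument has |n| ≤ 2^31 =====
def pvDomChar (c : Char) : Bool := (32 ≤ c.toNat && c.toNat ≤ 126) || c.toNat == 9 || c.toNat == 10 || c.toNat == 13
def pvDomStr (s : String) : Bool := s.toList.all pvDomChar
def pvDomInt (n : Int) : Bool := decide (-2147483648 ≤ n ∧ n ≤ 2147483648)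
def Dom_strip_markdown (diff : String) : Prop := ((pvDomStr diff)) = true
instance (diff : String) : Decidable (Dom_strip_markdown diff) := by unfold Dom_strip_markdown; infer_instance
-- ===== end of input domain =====

-- Header comment: B replaces A's single stateful flag-and-break loop by two phases
-- (drop preamble up to the first header line, then take lines up to the first fence),
-- same O(n) cost; equivalence of the return values is proved for every input.

-- ===== PORT A =====
-- A's inline conditions, named for readability (same tests, same order as A's code)
def pvHeaderA (ln : String) : Bool :=
  PySem.Str.startswith ln "---" || PySem.Str.startswith ln "+++" || PySem.Str.startswith ln "@@"

def pvFenceA (ln : String) : Bool :=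
  PySem.Str.startswith ln "```" || PySem.Str.startswith ln "~~~"

-- A's for-loop over the lines: state is the `active` flag; `break` returns, `continue` recurses
def pvLoopA : List String → Bool → List String
  | [], _ => []
  | ln :: ls, active =>
    let active := if pvHeaderA ln then true else active
    if pvFenceA ln then
      (if active then [] else pvLoopA ls active)
    else if active then ln :: pvLoopA ls active
    else pvLoopA ls active

def strip_markdown (diff : String) : String :=
  let lines := PySem.Str.splitlines diff
  let out := pvLoopA lines false
  if out = [] then diff else PySem.Str.join "\n" out

-- ===== PORT B =====
-- B's helpers _is_header/_is_fence are the same predicates as A's inline tests; shared above as pvHeaderA/pvFenceA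
def strip_markdown_alt (diff : String) : String :=
  let lines := PySem.Str.splitlines diff
  let i := lines.findIdx pvHeaderA          -- next((k …), len(lines))
  let rest := lines.drop i                   -- lines[i:]
  let j := rest.findIdx pvFenceA            -- next((k …), len(rest))
  let out := rest.take j                     -- rest[:j]
  if out = [] then diff else PySem.Str.join "\n" out

-- ===== PRECONDITION & SPEC =====
def Spec_strip_markdown (diff : String) (out : String) : Prop := out = strip_markdown_alt diff
instance (diff : String) (out : String) : Decidable (Spec_strip_markdown diff out) := by unfold Spec_strip_markdown; infer_instance

-- ===== CLAIM (what is proved, stated in full; the proofs are below) =====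
def Claim_equal_strip_markdown : Prop := ∀ (diff : String), Dom_strip_markdown diff → Spec_strip_markdown diff (strip_markdown diff)

-- ===== LEMMAS AND PROOFS =====

-- a header line ("---"/"+++"/"@@"-prefixed) is never a fence line ("```"/"~~~"-prefixed)
theorem header_not_fence (ln : String) (h : pvHeaderA ln = true) : pvFenceA ln = false := by
  simp only [pvHeaderA, pvFenceA, PySem.Str.startswith_eq, PySem.Chars.startswith_iff,
    Bool.or_eq_true, ← Bool.not_eq_true, PySem.Chars.startswith_iff] at h ⊢
  rcases h with (⟨t, ht⟩ | ⟨t, ht⟩) | ⟨t, ht⟩ <;>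
    rintro (⟨u, hu⟩ | ⟨u, hu⟩) <;> exact absurd (ht.trans hu.symm) (by simp)

-- once active, A keeps lines until the first fence
theorem loopA_active (ls : List String) :
    pvLoopA ls true = ls.take (ls.findIdx pvFenceA) := by
  induction ls with
  | nil => rfl
  | cons ln ls ih =>
    by_cases hf : pvFenceA ln = true <;>
      simp [pvLoopA, List.findIdx_cons, hf, ih]

-- A's whole loop equals B's drop-then-take decomposition
theorem loopA_eq (ls : List String) :
    pvLoopA ls false =
      (ls.drop (ls.findIdx pvHeaderA)).take
        ((ls.drop (ls.findIdx pvHeaderA)).findIdx pvFenceA) := by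
  induction ls with
  | nil => rfl
  | cons ln ls ih =>
    by_cases hh : pvHeaderA ln = true
    · have hf := header_not_fence ln hh
      simp [pvLoopA, List.findIdx_cons, hh, hf, loopA_active]
    · by_cases hf : pvFenceA ln = true <;>
        simp [pvLoopA, List.findIdx_cons, hh, hf, ih]

-- ===== VERDICT (by name: the statement is the Claim_ definition above) =====
theorem strip_markdown_spec : Claim_equal_strip_markdown := by
  intro diff _
  show strip_markdown diff = strip_markdown_alt diff
  simp only [strip_markdown, strip_markdown_alt, loopA_eq]
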